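-- pv_equiv track=rewrite | github.com/nerochristian/moonshal | ticket_system.py | _unique_channel_name
-- ===== SOURCE A (Python) =====
-- def _unique_channel_name(base: str, existing_names: set[str]) -> str:
--     candidate = (base or "ticket").strip().lower()
--     if candidate and candidate not in existing_names:
--         return candidate
--
--     alphabet = "abcdefghijklmnopqrstuvwxyz"
--     suffix = 0
--     while True:
--         suffix += 1
--         current = suffix
--         letters: list[str] = []
--         while current > 0:
--             current -= 1
--             letters.append(alphabet[current % 26])
--             current //= 26
--         candidate = f"{base}-" + "".join(reversed(letters))
--         if candidate not in existing_names:
--             return candidate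
-- ===== SOURCE B (Python) =====
-- def _unique_channel_name(base: str, existing_names: set[str]) -> str:
--     candidate = (base or "ticket").strip().lower()
--     if candidate and candidate not in existing_names:
--         return candidate
--
--     alphabet = "abcdefghijklmnopqrstuvwxyz"
--     # Enumerate suffixes level by level: all 1-letter words in order, then all
--     # 2-letter words in order, ... Each level is built from the previous one by
--     # appending every letter, which yields exactly the bijective base-26
--     # sequence a, b, ..., z, aa, ab, ... without any integer arithmetic.
--     level = [""]
--     while True:
--         level = [word + letter for word in level for letter in alphabet]
--         for word in level:
--             candidate = f"{base}-{word}"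
--             if candidate not in existing_names:
--                 return candidate
-- ===== Notes on version B (the rewrite author's own statement) =====
-- stated objective: alternative
-- what changed: The integer counter with per-candidate bijective base-26 digit extraction (inner divmod loop plus reverse) is replaced by a level-wise cartesian-product enumeration of suffix words (each level built from the previous by appending every letter), which produces the same a..z, aa..zz, ... sequence with no integer arithmetic.
import Mathlib
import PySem

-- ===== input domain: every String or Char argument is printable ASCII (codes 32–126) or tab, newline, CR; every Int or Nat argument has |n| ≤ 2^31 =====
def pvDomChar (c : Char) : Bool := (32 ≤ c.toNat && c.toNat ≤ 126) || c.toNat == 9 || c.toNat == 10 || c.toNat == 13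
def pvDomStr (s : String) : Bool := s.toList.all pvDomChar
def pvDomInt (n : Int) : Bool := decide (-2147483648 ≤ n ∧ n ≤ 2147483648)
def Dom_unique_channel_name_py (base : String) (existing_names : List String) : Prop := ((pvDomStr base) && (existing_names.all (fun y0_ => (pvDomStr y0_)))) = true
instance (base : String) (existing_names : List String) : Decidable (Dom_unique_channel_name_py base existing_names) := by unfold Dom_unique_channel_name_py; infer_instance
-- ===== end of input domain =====

-- B replaces A's integer counter + bijective base-26 digit loop by a level-wise
-- cartesian-product enumeration of suffix words (objective: alternative, same cost).

-- ===== PORT A =====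
def pvAlphabet : List Char := "abcdefghijklmnopqrstuvwxyz".toList

-- inner 'while current > 0' loop of A; alphabet[(current-1) % 26] is in range 0..25,
-- so plain List.getD is exact here
def pvInnerA (current : Nat) (letters : List Char) : List Char :=
  if h : 0 < current then
    pvInnerA ((current - 1) / 26) (letters ++ [pvAlphabet.getD ((current - 1) % 26) ' '])
  else letters
termination_by current
decreasing_by exact Nat.lt_of_le_of_lt (Nat.div_le_self _ _) (Nat.sub_lt h one_pos)

-- outer 'while True' loop of A; fuel existing_names.length + 1 always suffices
-- (proved below: pvLoopA_never_default), so the fuel-out "" is unreachable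
def pvLoopA (base : String) (ex : List String) (suffix : Nat) : Nat → String
  | 0 => ""
  | fuel + 1 =>
    let n := suffix + 1
    let candidate := String.ofList (base.toList ++ '-' :: (pvInnerA n []).reverse)
    if ex.contains candidate then pvLoopA base ex n fuel else candidate

def unique_channel_name_py (base : String) (existing_names : List String) : String :=
  let candidate := PySem.Str.lower (PySem.Str.strip (if base = "" then "ticket" else base))
  if candidate != "" && !(existing_names.contains candidate) then candidate
  else pvLoopA base existing_names 0 (existing_names.length + 1)

-- ===== PORT B =====
def pvNextLevel (level : List (List Char)) : List (List Char) :=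
  level.flatMap (fun word => pvAlphabet.map (fun letter => word ++ [letter]))

-- inner 'for word in level: ... return' loop of B
def pvScanLevel (base : String) (ex : List String) : List (List Char) → Option String
  | [] => none
  | word :: rest =>
    let candidate := String.ofList (base.toList ++ '-' :: word)
    if ex.contains candidate then pvScanLevel base ex rest else some candidate

-- outer 'while True' loop of B; same fuel remark as for pvLoopA
def pvLoopB (base : String) (ex : List String) (level : List (List Char)) : Nat → String
  | 0 => ""
  | fuel + 1 =>
    let level' := pvNextLevel level
    match pvScanLevel base ex level' with
    | some c => c
    | none => pvLoopB base ex level' fuel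

def unique_channel_name_py_alt (base : String) (existing_names : List String) : String :=
  let candidate := PySem.Str.lower (PySem.Str.strip (if base = "" then "ticket" else base))
  if candidate != "" && !(existing_names.contains candidate) then candidate
  else pvLoopB base existing_names [[]] (existing_names.length + 1)

-- ===== PRECONDITION & SPEC =====
def Spec_unique_channel_name_py (base : String) (existing_names : List String) (out : String) : Prop := out = unique_channel_name_py_alt base existing_names
instance (base : String) (existing_names : List String) (out : String) : Decidable (Spec_unique_channel_name_py base existing_names out) := by unfold Spec_unique_channel_name_py; infer_instance

-- ===== CLAIM (what is proved, stated in full; the proofs are below) =====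
def Claim_equal_unique_channel_name_py : Prop := ∀ (base : String) (existing_names : List String), Dom_unique_channel_name_py base existing_names → Spec_unique_channel_name_py base existing_names (unique_channel_name_py base existing_names)

-- ===== LEMMAS AND PROOFS =====

-- the bijective base-26 word of n (n = 0 ↦ "", 1 ↦ "a", 26 ↦ "z", 27 ↦ "aa", …)
def pvEnc : Nat → List Char
  | 0 => []
  | n + 1 => pvEnc (n / 26) ++ [pvAlphabet.getD (n % 26) ' ']
termination_by n => n
decreasing_by exact Nat.lt_succ_of_le (Nat.div_le_self _ _)

def pvCand (base : String) (n : Nat) : String :=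
  String.ofList (base.toList ++ '-' :: pvEnc n)

def pvNotIn (ex : List String) (c : String) : Bool := !(ex.contains c)

def pvF (base : String) (ex : List String) (s m : Nat) : Option String :=
  ((List.range' s m).map (pvCand base)).find? (pvNotIn ex)

theorem pvInnerA_eq : ∀ (c : Nat) (acc : List Char), pvInnerA c acc = acc ++ (pvEnc c).reverse := by
  intro c
  induction c using Nat.strong_induction_on with
  | _ c ih =>
    intro acc
    rcases c with _ | m
    · rw [pvInnerA]; simp [pvEnc]
    · rw [pvInnerA, dif_pos (Nat.succ_pos m)]
      simp only [Nat.add_sub_cancel]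
      rw [ih (m / 26) (Nat.lt_succ_of_le (Nat.div_le_self _ _))]
      rw [pvEnc]
      simp [List.reverse_append]

theorem pvLoopA_eq (base : String) (ex : List String) :
    ∀ (fuel s : Nat), pvLoopA base ex s fuel = (pvF base ex (s + 1) fuel).getD "" := by
  intro fuel
  induction fuel with
  | zero => intro s; simp [pvLoopA, pvF]
  | succ fuel ih =>
    intro s
    simp only [pvLoopA]
    simp only [pvInnerA_eq, List.nil_append, List.reverse_reverse]
    rw [pvF, List.range'_succ, List.map_cons]
    have hc : String.ofList (base.toList ++ '-' :: pvEnc (s + 1)) = pvCand base (s + 1) := rfl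
    rw [hc]
    cases h : pvNotIn ex (pvCand base (s + 1)) with
    | true =>
      rw [List.find?_cons_of_pos h]
      have hcf : ex.contains (pvCand base (s + 1)) = false := by
        simpa [pvNotIn] using h
      rw [if_neg (by rw [hcf]; exact Bool.false_ne_true)]
      rfl
    | false =>
      rw [List.find?_cons_of_neg (by rw [h]; exact Bool.false_ne_true)]
      have hct : ex.contains (pvCand base (s + 1)) = true := by
        simpa [pvNotIn] using h
      rw [if_pos hct, ih (s + 1)]
      rfl

theorem pvScanLevel_eq (base : String) (ex : List String) :
    ∀ ws : List (List Char),
      pvScanLevel base ex ws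
        = (ws.map (fun w => String.ofList (base.toList ++ '-' :: w))).find? (pvNotIn ex) := by
  intro ws
  induction ws with
  | nil => simp [pvScanLevel]
  | cons w rest ih =>
    simp only [pvScanLevel]
    rw [List.map_cons]
    cases h : pvNotIn ex (String.ofList (base.toList ++ '-' :: w)) with
    | true =>
      rw [List.find?_cons_of_pos h]
      have hcf : ex.contains (String.ofList (base.toList ++ '-' :: w)) = false := by
        simpa [pvNotIn] using h
      rw [if_neg (by rw [hcf]; exact Bool.false_ne_true)]
    | false =>
      rw [List.find?_cons_of_neg (by rw [h]; exact Bool.false_ne_true)]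
      have hct : ex.contains (String.ofList (base.toList ++ '-' :: w)) = true := by
        simpa [pvNotIn] using h
      rw [if_pos hct, ih]

theorem pvEnc_block (n j : Nat) (hj : j < 26) :
    pvEnc (26 * n + j + 1) = pvEnc n ++ [pvAlphabet.getD j ' '] := by
  rw [pvEnc]
  have h1 : (26 * n + j) / 26 = n := by omega
  have h2 : (26 * n + j) % 26 = j := by omega
  rw [h1, h2]

theorem pvMapAlpha (n : Nat) :
    pvAlphabet.map (fun c => pvEnc n ++ [c]) = (List.range' (26 * n + 1) 26).map pvEnc := by
  have hA : pvAlphabet = (List.range 26).map (fun j => pvAlphabet.getD j ' ') := by decide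
  conv_lhs => rw [hA]
  rw [List.range'_eq_map_range]
  simp only [List.map_map]
  apply List.map_congr_left
  intro j hj
  simp only [List.mem_range] at hj
  simp only [Function.comp]
  rw [show 26 * n + 1 + j = 26 * n + j + 1 by omega, pvEnc_block n j hj]

theorem pvRangeBlocks : ∀ (t s : Nat),
    (List.range' s t).flatMap (fun n => List.range' (26 * n + 1) 26) = List.range' (26 * s + 1) (26 * t) := by
  intro t
  induction t with
  | zero => simp
  | succ t ih =>
    intro s
    rw [List.range'_succ, List.flatMap_cons, ih (s + 1)]
    have happ := List.range'_append (s := 26 * s + 1) (m := 26) (n := 26 * t) (step := 1)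
    rw [show 26 * (s + 1) + 1 = 26 * s + 1 + 1 * 26 by ring, happ]
    congr 1
    ring

theorem pvNextLevel_enc (s m : Nat) :
    pvNextLevel ((List.range' s m).map pvEnc) = (List.range' (26 * s + 1) (26 * m)).map pvEnc := by
  unfold pvNextLevel
  rw [List.flatMap_map]
  have h1 : ∀ n ∈ List.range' s m,
      pvAlphabet.map (fun letter => pvEnc n ++ [letter])
        = (fun n => (List.range' (26 * n + 1) 26).map pvEnc) n := fun n _ => pvMapAlpha n
  rw [List.flatMap_congr h1]
  rw [← List.map_flatMap]
  rw [pvRangeBlocks]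

theorem pvAlph_inj : ∀ i < 26, ∀ j < 26,
    pvAlphabet.getD i ' ' = pvAlphabet.getD j ' ' → i = j := by decide

theorem pvEnc_inj : ∀ a b : Nat, pvEnc a = pvEnc b → a = b := by
  intro a
  induction a using Nat.strong_induction_on with
  | _ a ih =>
    intro b h
    rcases a with _ | a' <;> rcases b with _ | b'
    · rfl
    · rw [pvEnc, pvEnc] at h; simp at h
    · rw [pvEnc, pvEnc] at h; simp at h
    · rw [pvEnc, pvEnc] at h
      have h2 := List.append_inj' h (by rfl)
      obtain ⟨hpre, hlast⟩ := h2
      have hlast' : pvAlphabet.getD (a' % 26) ' ' = pvAlphabet.getD (b' % 26) ' ' := by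
        simpa using hlast
      have hmod : a' % 26 = b' % 26 :=
        pvAlph_inj _ (Nat.mod_lt _ (by norm_num)) _ (Nat.mod_lt _ (by norm_num)) hlast'
      have hdiv : a' / 26 = b' / 26 :=
        ih (a' / 26) (Nat.lt_succ_of_le (Nat.div_le_self _ _)) _ hpre
      omega

theorem pvCand_inj (base : String) : ∀ a b : Nat, pvCand base a = pvCand base b → a = b := by
  intro a b h
  unfold pvCand at h
  rw [String.ofList_inj] at h
  have h2 := List.append_cancel_left h
  exact pvEnc_inj a b (by simpa using h2)

theorem pvExists_not_in (base : String) (ex : List String) :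
    ∃ n : Nat, 0 < n ∧ n ≤ ex.length + 1 ∧ pvNotIn ex (pvCand base n) = true := by
  by_contra hcon
  push Not at hcon
  have hall : ∀ n ∈ List.range' 1 (ex.length + 1), (pvCand base n) ∈ ex := by
    intro n hn
    rw [List.mem_range'_1] at hn
    have h1 : 0 < n := hn.1
    have h2 : n ≤ ex.length + 1 := by omega
    have := hcon n h1 h2
    simp only [pvNotIn] at this
    exact List.contains_iff_mem.mp (by simpa using this)
  set l := (List.range' 1 (ex.length + 1)).map (pvCand base) with hl
  have hnodup : l.Nodup := by
    apply List.Nodup.map_on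
    · intro x _ y _ hxy; exact pvCand_inj base x y hxy
    · exact List.nodup_range'
  have hsub : l.toFinset ⊆ ex.toFinset := by
    intro x hx
    rw [List.mem_toFinset] at hx
    rw [List.mem_toFinset]
    obtain ⟨n, hn, rfl⟩ := List.mem_map.mp hx
    exact hall n hn
  have hcard1 : l.toFinset.card = ex.length + 1 := by
    rw [List.toFinset_card_of_nodup hnodup, hl, List.length_map, List.length_range']
  have hcard2 : ex.toFinset.card ≤ ex.length := List.toFinset_card_le ex
  have := Finset.card_le_card hsub
  omega

theorem pvF_eq (base : String) (ex : List String) (n₀ : Nat)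
    (h₀ : pvNotIn ex (pvCand base n₀) = true)
    (hmin : ∀ k, 0 < k → k < n₀ → pvNotIn ex (pvCand base k) = false) :
    ∀ m s, 0 < s → s ≤ n₀ → n₀ < s + m → pvF base ex s m = some (pvCand base n₀) := by
  intro m
  induction m with
  | zero => intro s h1 h2 h3; omega
  | succ m ih =>
    intro s h1 h2 h3
    rw [pvF, List.range'_succ, List.map_cons, List.find?_cons]
    by_cases hs : s = n₀
    · subst hs; rw [h₀]
    · have hfalse : pvNotIn ex (pvCand base s) = false := hmin s h1 (by omega)
      rw [hfalse]
      exact ih (s + 1) (by omega) (by omega) (by omega)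

theorem pvF_none (base : String) (ex : List String) (n₀ : Nat)
    (hmin : ∀ k, 0 < k → k < n₀ → pvNotIn ex (pvCand base k) = false) :
    ∀ m s, 0 < s → s + m ≤ n₀ → pvF base ex s m = none := by
  intro m
  induction m with
  | zero => intro s _ _; simp [pvF]
  | succ m ih =>
    intro s h1 h2
    rw [pvF, List.range'_succ, List.map_cons, List.find?_cons]
    have hfalse : pvNotIn ex (pvCand base s) = false := hmin s h1 (by omega)
    rw [hfalse]
    exact ih (s + 1) (by omega) (by omega)

theorem pvLoopB_eq (base : String) (ex : List String) (n₀ : Nat)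
    (h₀ : pvNotIn ex (pvCand base n₀) = true)
    (hmin : ∀ k, 0 < k → k < n₀ → pvNotIn ex (pvCand base k) = false) :
    ∀ fuel s m, 0 < m → m = 25 * s + 1 → s + m ≤ n₀ → n₀ < s + m + fuel →
      pvLoopB base ex ((List.range' s m).map pvEnc) fuel = pvCand base n₀ := by
  intro fuel
  induction fuel with
  | zero => intro s m _ _ h1 h2; omega
  | succ fuel ih =>
    intro s m hm hinv h1 h2
    simp only [pvLoopB]
    simp only [pvNextLevel_enc, pvScanLevel_eq, List.map_map]
    have hcomp : ((fun w => String.ofList (base.toList ++ '-' :: w)) ∘ pvEnc) = pvCand base := rfl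
    rw [hcomp]
    have hF : ((List.range' (26 * s + 1) (26 * m)).map (pvCand base)).find? (pvNotIn ex)
        = pvF base ex (26 * s + 1) (26 * m) := rfl
    rw [hF]
    by_cases hcase : n₀ < 26 * s + 1 + 26 * m
    · rw [pvF_eq base ex n₀ h₀ hmin (26 * m) (26 * s + 1) (by omega) (by omega) hcase]
    · rw [pvF_none base ex n₀ hmin (26 * m) (26 * s + 1) (by omega) (by omega)]
      have := ih (26 * s + 1) (26 * m) (by omega) (by omega) (by omega) (by omega)
      exact this

-- ===== VERDICT (by name: the statement is the Claim_ definition above) =====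
theorem unique_channel_name_py_spec : Claim_equal_unique_channel_name_py := by
  unfold Claim_equal_unique_channel_name_py Spec_unique_channel_name_py
  intro base ex _
  simp only [unique_channel_name_py, unique_channel_name_py_alt]
  set cand := PySem.Str.lower (PySem.Str.strip (if base = "" then "ticket" else base)) with hcand
  by_cases hfirst : (cand != "" && !(ex.contains cand)) = true
  · rw [if_pos hfirst, if_pos hfirst]
  · rw [if_neg hfirst, if_neg hfirst]
    -- choose n₀ = least n ≥ 1 whose candidate is fresh
    obtain ⟨nw, hnw1, hnw2, hnw3⟩ := pvExists_not_in base ex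
    have hexist : ∃ n, 0 < n ∧ pvNotIn ex (pvCand base n) = true := ⟨nw, hnw1, hnw3⟩
    set n₀ := Nat.find hexist with hn₀
    obtain ⟨hpos, hfresh⟩ := Nat.find_spec hexist
    have hle : n₀ ≤ ex.length + 1 := le_trans (Nat.find_le ⟨hnw1, hnw3⟩) hnw2
    have hmin : ∀ k, 0 < k → k < n₀ → pvNotIn ex (pvCand base k) = false := by
      intro k hk hklt
      have := Nat.find_min hexist hklt
      simp only [not_and] at this
      have := this hk
      simpa [Bool.not_eq_true] using this
    have hA : pvLoopA base ex 0 (ex.length + 1) = pvCand base n₀ := by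
      rw [pvLoopA_eq base ex (ex.length + 1) 0]
      rw [pvF_eq base ex n₀ hfresh hmin (ex.length + 1) 1 (by omega) (by omega) (by omega)]
      rfl
    have hB : pvLoopB base ex [[]] (ex.length + 1) = pvCand base n₀ := by
      have hlvl0 : ([[]] : List (List Char)) = (List.range' 0 1).map pvEnc := by
        rw [List.range'_one]; simp [pvEnc]
      rw [hlvl0]
      exact pvLoopB_eq base ex n₀ hfresh hmin (ex.length + 1) 0 1 (by omega) (by omega)
        (by omega) (by omega)
    rw [hA, hB]
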